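-- pv_equiv track=rewrite | github.com/OpportunV/adventofcode | 2018/day14.py | part_two
-- ===== SOURCE A (Python) =====
-- def part_two(inp):
--     recipes = [3, 7]
--     target = list(map(int, str(inp)))
--     first = 0
--     second = 1
--     while target != recipes[-len(target):] and target != recipes[-len(target) - 1: -1]:
--         first, second = simulate(first, recipes, second)
--
--     return len(recipes) - len(target) if target == recipes[-len(target):] else len(recipes) - len(target) - 1
--
-- def simulate(first, recipes, second):
--     new_recipes = recipes[first] + recipes[second]
--     if new_recipes >= 10:
--         recipes.extend(divmod(new_recipes, 10))
--     else:
--         recipes.append(new_recipes)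
--
--     first = (first + 1 + recipes[first]) % len(recipes)
--     second = (second + 1 + recipes[second]) % len(recipes)
--     return first, second
-- ===== SOURCE B (Python) =====
-- # B: same recipe generation, but the target is matched arithmetically: the last L
-- # digits (and the window one position earlier) are kept as rolling numbers mod 10**L,
-- # so each iteration does two integer comparisons instead of building slices/lists.
-- def part_two(inp):
--     L = len(str(inp))
--     M = 10 ** L
--     recipes = [3, 7]
--     first, second = 0, 1
--     cur = 37 % M   # the last (up to) L recipes read as a number
--     prev = 3 % M   # the same for the window ending one position earlier
--     while True:
--         n = len(recipes)
--         if n >= L and cur == inp: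
--             return n - L
--         if n >= L + 1 and prev == inp:
--             return n - L - 1
--         s = recipes[first] + recipes[second]
--         if s >= 10:
--             recipes.append(s // 10)
--             recipes.append(s % 10)
--             prev = (cur * 10 + s // 10) % M
--             cur = (prev * 10 + s % 10) % M
--         else:
--             recipes.append(s)
--             prev = cur
--             cur = (cur * 10 + s) % M
--         first = (first + 1 + recipes[first]) % len(recipes)
--         second = (second + 1 + recipes[second]) % len(recipes)
-- ===== Notes on version B (the rewrite author's own statement) =====
-- stated objective: alternative
-- what changed: A rebuilds and compares two list slices of the recipe list against the target digit list on every iteration; B never materializes the target or any slice and instead keeps the two candidate windows as rolling integers modulo a power of ten sized to the target, reducing each check to two integer comparisons.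
import Mathlib
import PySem

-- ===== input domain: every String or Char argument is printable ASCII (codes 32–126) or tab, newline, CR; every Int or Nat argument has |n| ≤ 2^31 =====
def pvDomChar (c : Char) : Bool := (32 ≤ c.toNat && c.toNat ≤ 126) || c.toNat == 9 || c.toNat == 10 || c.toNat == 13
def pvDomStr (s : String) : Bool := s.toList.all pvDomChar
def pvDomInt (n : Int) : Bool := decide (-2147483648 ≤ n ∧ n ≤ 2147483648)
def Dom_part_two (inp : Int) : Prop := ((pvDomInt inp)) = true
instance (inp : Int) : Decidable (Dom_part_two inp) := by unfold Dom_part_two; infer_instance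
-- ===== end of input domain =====

-- B replaces A's per-iteration list slicing/compares by two rolling last-window values
-- kept as numbers mod 10^len(target) (alternative formulation, same generation loop).
-- Both loops are fueled in Lean (fuel guard only; the Python loops are unbounded).

-- ===== PORT A =====
def pvFuel : Nat := 1000000000000

-- helper simulate(first, recipes, second) (A mutates `recipes` in place; here the new array is returned).
-- Python list-with-append is ported as Array (push); recipes[i] is pvAGet (exact: both indices are
-- `% len(recipes)` of a positive length, hence in [0, len)), and the two negative-bound slices
-- recipes[-L:] and recipes[-L-1:-1] are hand-ported as `extract` (exact: L ≥ 1, so Python clamps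
-- the negative bounds at 0 exactly as Nat subtraction does).
def pvAGet (xs : Array Int) (i : Int) : Int := xs.getD i.toNat 0

def pvSimulate (first : Int) (recipes : Array Int) (second : Int) : Int × Array Int × Int :=
  let new_recipes := pvAGet recipes first + pvAGet recipes second
  -- recipes.extend(divmod(new_recipes, 10)) / recipes.append(new_recipes)
  let recipes := if 10 ≤ new_recipes then
      (recipes.push (PySem.Int.floordiv new_recipes 10)).push (PySem.Int.mod new_recipes 10)
    else recipes.push new_recipes
  let first := PySem.Int.mod (first + 1 + pvAGet recipes first) (recipes.size : Int)
  let second := PySem.Int.mod (second + 1 + pvAGet recipes second) (recipes.size : Int)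
  (first, recipes, second)

-- the while loop, one fuel unit per iteration (check, then simulate)
def part_two_loop (target : List Int) : Nat → Array Int → Int → Int → Array Int × Int × Int
  | 0, recipes, first, second => (recipes, first, second)
  | fuel + 1, recipes, first, second =>
    if target ≠ (recipes.extract (recipes.size - target.length) recipes.size).toList ∧
       target ≠ (recipes.extract (recipes.size - (target.length + 1)) (recipes.size - 1)).toList then
      let r := pvSimulate first recipes second
      part_two_loop target fuel r.2.1 r.1 r.2.2
    else (recipes, first, second)

def part_two (inp : Int) : Int :=
  let recipes : Array Int := #[3, 7]
  -- target = list(map(int, str(inp))); int(char) raises for '-' (inp < 0), excluded by Pre_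
  let target : List Int :=
    (PySem.Int.toStr inp).toList.map (fun c => (PySem.Int.ofStr? (String.singleton c)).getD 0)
  let r := part_two_loop target pvFuel recipes 0 1
  if target = (r.1.extract (r.1.size - target.length) r.1.size).toList then
    (r.1.size : Int) - (target.length : Int)
  else
    (r.1.size : Int) - (target.length : Int) - 1

-- ===== PORT B =====
def part_two_alt_loop (inp L M : Int) : Nat → Array Int → Int → Int → Int → Int → Int
  | 0, recipes, _, _, cur, _ =>
    -- fuel guard only (the Python loop is unbounded)
    if L ≤ (recipes.size : Int) ∧ cur = inp then (recipes.size : Int) - L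
    else (recipes.size : Int) - L - 1
  | fuel + 1, recipes, first, second, cur, prev =>
    let n : Int := (recipes.size : Int)
    if L ≤ n ∧ cur = inp then n - L
    else if L + 1 ≤ n ∧ prev = inp then n - L - 1
    else
      let s := pvAGet recipes first + pvAGet recipes second
      let t :=
        if 10 ≤ s then
          let p := PySem.Int.mod (cur * 10 + PySem.Int.floordiv s 10) M
          ((recipes.push (PySem.Int.floordiv s 10)).push (PySem.Int.mod s 10), p,
            PySem.Int.mod (p * 10 + PySem.Int.mod s 10) M)
        else (recipes.push s, cur, PySem.Int.mod (cur * 10 + s) M)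
      let first' := PySem.Int.mod (first + 1 + pvAGet t.1 first) (t.1.size : Int)
      let second' := PySem.Int.mod (second + 1 + pvAGet t.1 second) (t.1.size : Int)
      part_two_alt_loop inp L M fuel t.1 first' second' t.2.2 t.2.1

def part_two_alt (inp : Int) : Int :=
  let L : Int := PySem.Str.len (PySem.Int.toStr inp)   -- len(str(inp)) ≥ 1
  let M : Int := (10 : Int) ^ L.toNat                  -- 10 ** L (exact: L ≥ 0 always)
  part_two_alt_loop inp L M pvFuel #[3, 7] 0 1 (PySem.Int.mod 37 M) (PySem.Int.mod 3 M)

-- ===== PRECONDITION & SPEC =====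
-- Pre_ excludes inp < 0, on which A raises ValueError (int('-') while building `target`).
def Pre_part_two (inp : Int) : Prop := 0 ≤ inp
instance (inp : Int) : Decidable (Pre_part_two inp) := by unfold Pre_part_two; infer_instance
def pvWitness_part_two : Int := 37

def Spec_part_two (inp : Int) (out : Int) : Prop := out = part_two_alt inp
instance (inp : Int) (out : Int) : Decidable (Spec_part_two inp out) := by unfold Spec_part_two; infer_instance

-- ===== CLAIM (what is proved, stated in full; the proofs are below) =====
def Claim_equal_part_two : Prop := ∀ (inp : Int), Dom_part_two inp → Pre_part_two inp → Spec_part_two inp (part_two inp)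

-- ===== LEMMAS AND PROOFS =====

-- value of a digit list, most significant digit first
def pvVal : List Int → Int
  | [] => 0
  | d :: ds => d * 10 ^ ds.length + pvVal ds

theorem pvVal_append (xs ys : List Int) :
    pvVal (xs ++ ys) = pvVal xs * 10 ^ ys.length + pvVal ys := by
  induction xs with
  | nil => simp [pvVal]
  | cons d xs ih =>
    simp only [List.cons_append, pvVal, ih, List.length_append]
    ring

theorem pvVal_bounds (xs : List Int) (h : ∀ d ∈ xs, 0 ≤ d ∧ d < 10) :
    0 ≤ pvVal xs ∧ pvVal xs < 10 ^ xs.length := by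
  induction xs with
  | nil => simp [pvVal]
  | cons d ds ih =>
    have hd := h d (by simp)
    have ih' := ih (fun x hx => h x (by simp [hx]))
    have hpow : (0:Int) < 10 ^ ds.length := by positivity
    constructor
    · simp only [pvVal]; nlinarith [ih'.1, hd.1]
    · simp only [pvVal, List.length_cons, pow_succ]
      nlinarith [ih'.2, hd.2, hpow]

theorem pvVal_inj (xs ys : List Int) (hlen : xs.length = ys.length)
    (hx : ∀ d ∈ xs, 0 ≤ d ∧ d < 10) (hy : ∀ d ∈ ys, 0 ≤ d ∧ d < 10)
    (hv : pvVal xs = pvVal ys) : xs = ys := by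
  induction xs generalizing ys with
  | nil => cases ys with
    | nil => rfl
    | cons y ys => simp at hlen
  | cons x xs ih =>
    cases ys with
    | nil => simp at hlen
    | cons y ys =>
      simp only [List.length_cons, Nat.add_right_cancel_iff] at hlen
      have hxb := pvVal_bounds xs (fun d hd => hx d (by simp [hd]))
      have hyb := pvVal_bounds ys (fun d hd => hy d (by simp [hd]))
      have hx0 := hx x (by simp)
      have hy0 := hy y (by simp)
      simp only [pvVal, hlen] at hv
      have hpow : (0:Int) < 10 ^ ys.length := by positivity
      rw [hlen] at hxb
      have hxy : x = y := by
        rcases lt_trichotomy x y with h | h | h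
        · exfalso
          have hm := mul_le_mul_of_nonneg_right (by omega : x + 1 ≤ y) hpow.le
          nlinarith [hxb.1, hxb.2, hyb.1, hyb.2]
        · exact h
        · exfalso
          have hm := mul_le_mul_of_nonneg_right (by omega : y + 1 ≤ x) hpow.le
          nlinarith [hxb.1, hxb.2, hyb.1, hyb.2]
      subst hxy
      have hv' : pvVal xs = pvVal ys := by linarith
      rw [ih ys hlen (fun d hd => hx d (by simp [hd])) (fun d hd => hy d (by simp [hd])) hv']


-- ----- target characterization: map(int, str(inp)) for 0 ≤ inp -----

def pvCharVal (c : Char) : Int := (PySem.Int.ofStr? (String.singleton c)).getD 0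

theorem pvCharVal_digitChar (d : Nat) (h : d < 10) : pvCharVal (Nat.digitChar d) = (d : Int) := by
  interval_cases d <;> decide

theorem pvToDigitsCore_eq :
    ∀ (f n : Nat) (acc : List Char), 0 < n → n < 10 ^ f →
      Nat.toDigitsCore 10 f n acc = ((Nat.digits 10 n).reverse.map Nat.digitChar) ++ acc := by
  intro f
  induction f with
  | zero => intro n acc hn hlt; simp at hlt; omega
  | succ f ih =>
    intro n acc hn hlt
    rw [Nat.toDigitsCore]
    by_cases h10 : n / 10 = 0
    · have hlt10 : n < 10 := by omega
      have hmod : n % 10 = n := Nat.mod_eq_of_lt hlt10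
      rw [if_pos h10, Nat.digits_def' (by norm_num) hn, h10]
      simp [hmod]
    · rw [if_neg h10]
      have h1 : 0 < n / 10 := Nat.pos_of_ne_zero h10
      have h2 : n / 10 < 10 ^ f := by
        rw [pow_succ'] at hlt
        exact Nat.div_lt_of_lt_mul hlt
      rw [ih (n / 10) _ h1 h2, Nat.digits_def' (by norm_num) hn]
      simp [List.append_assoc]

theorem pvToDigits_eq (n : Nat) (hn : 0 < n) :
    Nat.toDigits 10 n = (Nat.digits 10 n).reverse.map Nat.digitChar := by
  have h : n < 10 ^ (n + 1) :=
    lt_of_lt_of_le (Nat.lt_pow_self (by norm_num)) (Nat.pow_le_pow_right (by norm_num) (by omega))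
  simpa using pvToDigitsCore_eq (n + 1) n [] hn h

theorem pvVal_cast_rev (ds : List Nat) :
    pvVal ((ds.map (Nat.cast : Nat → Int)).reverse) = ((Nat.ofDigits 10 ds : Nat) : Int) := by
  induction ds with
  | nil => norm_num [pvVal, Nat.ofDigits_nil]
  | cons d ds ih =>
    rw [List.map_cons, List.reverse_cons, pvVal_append, ih, Nat.ofDigits_cons]
    have h1 : pvVal [((d : Nat) : Int)] = (d : Int) := by simp [pvVal]
    rw [h1]
    push_cast
    norm_num
    ring

-- target facts, bundled
theorem pvTarget_facts (inp : Int) (hinp : 0 ≤ inp) :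
    (∀ d ∈ (PySem.Int.toStr inp).toList.map pvCharVal, 0 ≤ d ∧ d < 10) ∧
    pvVal ((PySem.Int.toStr inp).toList.map pvCharVal) = inp ∧
    1 ≤ ((PySem.Int.toStr inp).toList.map pvCharVal).length := by
  rw [PySem.Int.toList_toStr]
  have htc : PySem.Int.toChars inp = Nat.toDigits 10 inp.toNat := by
    unfold PySem.Int.toChars
    rw [if_neg (by omega)]
  rcases eq_or_lt_of_le hinp with h0 | hpos
  · rw [htc, ← h0]
    refine ⟨?_, ?_, ?_⟩ <;> decide
  · have hN : 0 < inp.toNat := by omega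
    rw [htc, pvToDigits_eq _ hN, List.map_map]
    have hmap : (((Nat.digits 10 inp.toNat).reverse).map (pvCharVal ∘ Nat.digitChar))
        = (((Nat.digits 10 inp.toNat).reverse).map (Nat.cast : Nat → Int)) :=
      List.map_congr_left (fun d hd =>
        pvCharVal_digitChar d (Nat.digits_lt_base (by norm_num) (List.mem_reverse.mp hd)))
    rw [hmap]
    have hrev : ((Nat.digits 10 inp.toNat).reverse).map (Nat.cast : Nat → Int)
        = (((Nat.digits 10 inp.toNat).map (Nat.cast : Nat → Int)).reverse) := by
      rw [List.map_reverse]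
    refine ⟨?_, ?_, ?_⟩
    · intro d hd
      simp only [List.mem_map, List.mem_reverse] at hd
      obtain ⟨x, hx, rfl⟩ := hd
      have : x < 10 := Nat.digits_lt_base (by norm_num) hx
      constructor <;> omega
    · rw [hrev, pvVal_cast_rev, Nat.ofDigits_digits, Int.toNat_of_nonneg hinp]
    · have hne : Nat.digits 10 inp.toNat ≠ [] := Nat.digits_ne_nil_iff_ne_zero.mpr (by omega)
      simp only [List.length_map, List.length_reverse]
      exact Nat.one_le_iff_ne_zero.mpr (by simpa using hne)

-- ----- window characterizations -----

theorem pvRoll (a d M : Int) : (a % M * 10 + d) % M = (a * 10 + d) % M := by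
  conv_lhs => rw [Int.add_emod, Int.mul_emod]
  conv_rhs => rw [Int.add_emod, Int.mul_emod]
  rw [Int.emod_emod_of_dvd _ (dvd_refl M)]

theorem pvWindow (inp : Int) (tgt : List Int)
    (hT1 : ∀ d ∈ tgt, 0 ≤ d ∧ d < 10) (hT2 : pvVal tgt = inp)
    (r : List Int) (hr : ∀ d ∈ r, 0 ≤ d ∧ d < 10) (hlen : tgt.length ≤ r.length) :
    (tgt = r.drop (r.length - tgt.length)) ↔ pvVal r % (10 : Int) ^ tgt.length = inp := by
  set w := r.drop (r.length - tgt.length) with hw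
  have hwlen : w.length = tgt.length := by
    rw [hw, List.length_drop]; omega
  have hwdig : ∀ d ∈ w, 0 ≤ d ∧ d < 10 := fun d hd => hr d (List.mem_of_mem_drop hd)
  have hsplit : pvVal r = pvVal (r.take (r.length - tgt.length)) * 10 ^ tgt.length + pvVal w := by
    conv_lhs => rw [← List.take_append_drop (r.length - tgt.length) r]
    rw [pvVal_append, hwlen]
  have hwb := pvVal_bounds w hwdig
  rw [hwlen] at hwb
  have hmod : pvVal r % (10 : Int) ^ tgt.length = pvVal w := by
    rw [hsplit, add_comm, Int.add_mul_emod_self_right, Int.emod_eq_of_lt hwb.1 hwb.2]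
  rw [hmod]
  constructor
  · intro h; rw [← h]; exact hT2
  · intro h
    exact (pvVal_inj w tgt (by omega) hwdig hT1 (by rw [h, hT2])).symm

-- the `recipes[-L:]` window of an array, reduced to drop-form on toList
theorem pvExtract1 (r : Array Int) (k : Nat) :
    (r.extract (r.size - k) r.size).toList = r.toList.drop (r.size - k) := by
  rw [Array.toList_extract, List.extract_eq_take_drop,
    show r.size - (r.size - k) = (r.toList.drop (r.size - k)).length by
      rw [List.length_drop, Array.length_toList],
    List.take_length]

theorem pvS1 (inp : Int) (tgt : List Int)
    (hT1 : ∀ d ∈ tgt, 0 ≤ d ∧ d < 10) (hT2 : pvVal tgt = inp) (hL : 1 ≤ tgt.length)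
    (r : Array Int) (hr : ∀ d ∈ r.toList, 0 ≤ d ∧ d < 10) :
    (tgt = (r.extract (r.size - tgt.length) r.size).toList) ↔
      ((tgt.length : Int) ≤ (r.size : Int) ∧ pvVal r.toList % (10 : Int) ^ tgt.length = inp) := by
  rw [pvExtract1, ← Array.length_toList (xs := r)]
  by_cases hlen : tgt.length ≤ r.toList.length
  · rw [pvWindow inp tgt hT1 hT2 r.toList hr hlen]
    constructor
    · intro h; exact ⟨by exact_mod_cast hlen, h⟩
    · intro h; exact h.2
  · constructor
    · intro h
      exfalso
      have := congrArg List.length h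
      rw [List.length_drop] at this
      omega
    · intro h
      exfalso
      have : (tgt.length : Int) ≤ (r.toList.length : Int) := h.1
      omega

theorem pvS2 (inp : Int) (tgt : List Int)
    (hT1 : ∀ d ∈ tgt, 0 ≤ d ∧ d < 10) (hT2 : pvVal tgt = inp) (hL : 1 ≤ tgt.length)
    (r : Array Int) (hr : ∀ d ∈ r.toList, 0 ≤ d ∧ d < 10) (hr2 : 2 ≤ r.size) :
    (tgt = (r.extract (r.size - (tgt.length + 1)) (r.size - 1)).toList) ↔
      ((tgt.length : Int) + 1 ≤ (r.size : Int) ∧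
        pvVal r.toList.dropLast % (10 : Int) ^ tgt.length = inp) := by
  have hslice : (r.extract (r.size - (tgt.length + 1)) (r.size - 1)).toList =
      (r.toList.drop (r.size - (tgt.length + 1))).take ((r.size - 1) - (r.size - (tgt.length + 1))) := by
    rw [Array.toList_extract, List.extract_eq_take_drop]
  rw [hslice, ← Array.length_toList (xs := r)] at *
  set l := r.toList with hl
  by_cases hlen : tgt.length + 1 ≤ l.length
  · have heq : (l.drop (l.length - (tgt.length + 1))).take ((l.length - 1) - (l.length - (tgt.length + 1)))
        = l.dropLast.drop (l.dropLast.length - tgt.length) := by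
      rw [List.length_dropLast, List.dropLast_eq_take, List.drop_take]
      congr 1
      · omega
      · congr 1
        omega
    rw [heq, pvWindow inp tgt hT1 hT2 l.dropLast
      (fun d hd => hr d ((List.dropLast_sublist l).mem hd))
      (by rw [List.length_dropLast]; omega)]
    constructor
    · intro h; exact ⟨by exact_mod_cast hlen, h⟩
    · intro h; exact h.2
  · constructor
    · intro h
      exfalso
      have := congrArg List.length h
      rw [List.length_take, List.length_drop] at this
      omega
    · intro h
      exfalso
      have : (tgt.length : Int) + 1 ≤ (l.length : Int) := h.1
      omega

-- array indexing with an in-range index lands in toList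
theorem pvAGet_mem (r : Array Int) (i : Int) (h0 : 0 ≤ i) (h1 : i < (r.size : Int)) :
    pvAGet r i ∈ r.toList := by
  have hlt : i.toNat < r.size := by omega
  simp only [pvAGet, Array.getD, dif_pos hlt]
  exact Array.getElem_mem_toList hlt

-- ----- the lock-step loop equivalence -----

def pvFinalize (tgt : List Int) (st : Array Int × Int × Int) : Int :=
  if tgt = (st.1.extract (st.1.size - tgt.length) st.1.size).toList then
    (st.1.size : Int) - (tgt.length : Int)
  else (st.1.size : Int) - (tgt.length : Int) - 1

theorem pvLoop_eq (inp : Int) (tgt : List Int)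
    (hT1 : ∀ d ∈ tgt, 0 ≤ d ∧ d < 10) (hT2 : pvVal tgt = inp) (hL : 1 ≤ tgt.length) :
    ∀ (fuel : Nat) (r : Array Int) (i j cur prev : Int),
      (∀ d ∈ r.toList, 0 ≤ d ∧ d < 10) → 2 ≤ r.size →
      0 ≤ i → i < (r.size : Int) → 0 ≤ j → j < (r.size : Int) →
      cur = pvVal r.toList % (10 : Int) ^ tgt.length →
      prev = pvVal r.toList.dropLast % (10 : Int) ^ tgt.length →
      pvFinalize tgt (part_two_loop tgt fuel r i j)
        = part_two_alt_loop inp (tgt.length : Int) ((10 : Int) ^ tgt.length) fuel r i j cur prev := by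
  have hM : (0 : Int) < 10 ^ tgt.length := by positivity
  intro fuel
  induction fuel with
  | zero =>
    intro r i j cur prev hr hr2 hi0 hi1 hj0 hj1 hcur hprev
    subst hcur; subst hprev
    simp only [part_two_loop, part_two_alt_loop, pvFinalize]
    rw [if_congr (pvS1 inp tgt hT1 hT2 hL r hr) rfl rfl]
  | succ fuel ih =>
    intro r i j cur prev hr hr2 hi0 hi1 hj0 hj1 hcur hprev
    subst hcur; subst hprev
    have h1 := pvS1 inp tgt hT1 hT2 hL r hr
    have h2 := pvS2 inp tgt hT1 hT2 hL r hr hr2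
    simp only [part_two_loop, part_two_alt_loop]
    by_cases hc1 : tgt = (r.extract (r.size - tgt.length) r.size).toList
    · rw [if_neg (by tauto), if_pos (h1.mp hc1)]
      simp only [pvFinalize, if_pos hc1]
    · by_cases hc2 : tgt = (r.extract (r.size - (tgt.length + 1)) (r.size - 1)).toList
      · rw [if_neg (by tauto), if_neg ((not_congr h1).mp hc1), if_pos (h2.mp hc2)]
        simp only [pvFinalize, if_neg hc1]
      · rw [if_pos ⟨hc1, hc2⟩, if_neg ((not_congr h1).mp hc1), if_neg ((not_congr h2).mp hc2)]
        -- both sides take one generation step; states coincide, invariants persist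
        have ha := hr _ (pvAGet_mem r i hi0 hi1)
        have hb := hr _ (pvAGet_mem r j hj0 hj1)
        set a := pvAGet r i with haDef
        set b := pvAGet r j with hbDef
        simp only [pvSimulate]
        by_cases hs : (10 : Int) ≤ a + b
        · rw [if_pos hs, if_pos hs]
          have hd1 : PySem.Int.floordiv (a + b) 10 = 1 := by
            rw [PySem.Int.floordiv_eq_ediv_of_pos (by norm_num)]; omega
          have hd2a : 0 ≤ PySem.Int.mod (a + b) 10 := PySem.Int.mod_nonneg _ (by norm_num)
          have hd2b : PySem.Int.mod (a + b) 10 < 10 := PySem.Int.mod_lt _ (by norm_num)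
          set d1 := PySem.Int.floordiv (a + b) 10 with hd1Def
          set d2 := PySem.Int.mod (a + b) 10 with hd2Def
          set R := (r.push d1).push d2 with hR
          have hRL : R.toList = (r.toList ++ [d1]) ++ [d2] := by
            rw [hR, Array.toList_push, Array.toList_push]
          have hRdig : ∀ d ∈ R.toList, 0 ≤ d ∧ d < 10 := by
            intro d hd
            rw [hRL, List.mem_append, List.mem_append] at hd
            rcases hd with (hd | hd) | hd
            · exact hr d hd
            · simp only [List.mem_singleton] at hd; subst hd; omega
            · simp only [List.mem_singleton] at hd; subst hd; exact ⟨hd2a, hd2b⟩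
          have hRlen : 2 ≤ R.size := by rw [hR]; simp [Array.size_push]
          have hRpos : (0 : Int) < (R.size : Int) := by
            have := hRlen; omega
          have hRlast : R.toList.dropLast = r.toList ++ [d1] := by
            rw [hRL, List.dropLast_concat]
          have hval1 : pvVal (r.toList ++ [d1]) = pvVal r.toList * 10 + d1 := by
            rw [pvVal_append]; simp [pvVal]
          have hvalR : pvVal R.toList = pvVal (r.toList ++ [d1]) * 10 + d2 := by
            rw [hRL, pvVal_append]
            simp [pvVal]
          have hp : PySem.Int.mod (pvVal r.toList % 10 ^ tgt.length * 10 + d1) (10 ^ tgt.length)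
              = pvVal (r.toList ++ [d1]) % 10 ^ tgt.length := by
            rw [PySem.Int.mod_eq_emod_of_pos hM, pvRoll, hval1]
          refine ih R _ _ _ _ hRdig hRlen
            (PySem.Int.mod_nonneg _ hRpos) (PySem.Int.mod_lt _ hRpos)
            (PySem.Int.mod_nonneg _ hRpos) (PySem.Int.mod_lt _ hRpos) ?_ ?_
          · dsimp only
            rw [hp, PySem.Int.mod_eq_emod_of_pos hM, pvRoll, hvalR]
          · dsimp only
            rw [hp, hRlast]
        · rw [if_neg hs, if_neg hs]
          set R := r.push (a + b) with hR
          have hRL : R.toList = r.toList ++ [a + b] := by rw [hR, Array.toList_push]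
          have hRdig : ∀ d ∈ R.toList, 0 ≤ d ∧ d < 10 := by
            intro d hd
            rw [hRL, List.mem_append] at hd
            rcases hd with hd | hd
            · exact hr d hd
            · simp only [List.mem_singleton] at hd; subst hd; omega
          have hRlen : 2 ≤ R.size := by rw [hR]; simp [Array.size_push]; omega
          have hRpos : (0 : Int) < (R.size : Int) := by
            have := hRlen; omega
          have hRlast : R.toList.dropLast = r.toList := by rw [hRL, List.dropLast_concat]
          have hvalR : pvVal R.toList = pvVal r.toList * 10 + (a + b) := by
            rw [hRL, pvVal_append]; simp [pvVal]
          refine ih R _ _ _ _ hRdig hRlen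
            (PySem.Int.mod_nonneg _ hRpos) (PySem.Int.mod_lt _ hRpos)
            (PySem.Int.mod_nonneg _ hRpos) (PySem.Int.mod_lt _ hRpos) ?_ ?_
          · dsimp only
            rw [PySem.Int.mod_eq_emod_of_pos hM, pvRoll, hvalR]
          · dsimp only
            rw [hRlast]

-- ===== VERDICT (by name: the statement is the Claim_ definition above) =====
theorem part_two_spec : Claim_equal_part_two := by
  intro inp _ hpre
  have hpre' : 0 ≤ inp := hpre
  obtain ⟨hT1, hT2, hL⟩ := pvTarget_facts inp hpre'
  have hM : (0 : Int) < 10 ^ ((PySem.Int.toStr inp).toList.map pvCharVal).length := by positivity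
  have hLen : PySem.Str.len (PySem.Int.toStr inp)
      = (((PySem.Int.toStr inp).toList.map pvCharVal).length : Int) := by
    rw [PySem.Str.len_eq, List.length_map]
  have hA : part_two inp
      = pvFinalize ((PySem.Int.toStr inp).toList.map pvCharVal)
          (part_two_loop ((PySem.Int.toStr inp).toList.map pvCharVal) pvFuel #[3, 7] 0 1) := rfl
  have hB : part_two_alt inp
      = part_two_alt_loop inp (((PySem.Int.toStr inp).toList.map pvCharVal).length : Int)
          ((10 : Int) ^ ((PySem.Int.toStr inp).toList.map pvCharVal).length) pvFuel #[3, 7] 0 1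
          (PySem.Int.mod 37 ((10 : Int) ^ ((PySem.Int.toStr inp).toList.map pvCharVal).length))
          (PySem.Int.mod 3 ((10 : Int) ^ ((PySem.Int.toStr inp).toList.map pvCharVal).length)) := by
    show part_two_alt_loop inp (PySem.Str.len (PySem.Int.toStr inp))
        ((10 : Int) ^ (PySem.Str.len (PySem.Int.toStr inp)).toNat) pvFuel #[3, 7] 0 1 _ _ = _
    rw [hLen, Int.toNat_natCast]
  show part_two inp = part_two_alt inp
  rw [hA, hB]
  apply pvLoop_eq inp _ hT1 hT2 hL pvFuel #[3, 7] 0 1 _ _ (by decide) (by decide)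
    (by norm_num) (by norm_num) (by norm_num) (by norm_num)
  · rw [PySem.Int.mod_eq_emod_of_pos hM]
    norm_num [pvVal]
  · rw [PySem.Int.mod_eq_emod_of_pos hM]
    norm_num [pvVal]
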